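-- pv_equiv track=rewrite | github.com/othonalberto/hackerRank_ctci | python/leftRotation.py | array_left_rotation
-- ===== SOURCE A (Python) =====
-- def array_left_rotation(a, n, k):
--     vec = [None]*n
--
--     k = k % n
--     newPosition = 0
--
--     for i in range(0, n):
--         newPosition = (n+i-k)%n
--         vec[newPosition] = a[i]
--
--     return vec
-- ===== SOURCE B (Python) =====
-- def array_left_rotation(a, n, k):
--     k = k % n
--     return [a[i] for i in range(k, n)] + [a[i] for i in range(k)]
-- ===== Notes on version B (the rewrite author's own statement) =====
-- stated objective: simpler
-- what changed: A preallocates a [None]*n buffer and scatters each a[i] into position (n+i-k%n)%n with a per-element modulus; B reduces k once and gathers the two contiguous runs a[k..n-1] then a[0..k-1] directly into the result, with no buffer and no modulus in the loop.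
import Mathlib
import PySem

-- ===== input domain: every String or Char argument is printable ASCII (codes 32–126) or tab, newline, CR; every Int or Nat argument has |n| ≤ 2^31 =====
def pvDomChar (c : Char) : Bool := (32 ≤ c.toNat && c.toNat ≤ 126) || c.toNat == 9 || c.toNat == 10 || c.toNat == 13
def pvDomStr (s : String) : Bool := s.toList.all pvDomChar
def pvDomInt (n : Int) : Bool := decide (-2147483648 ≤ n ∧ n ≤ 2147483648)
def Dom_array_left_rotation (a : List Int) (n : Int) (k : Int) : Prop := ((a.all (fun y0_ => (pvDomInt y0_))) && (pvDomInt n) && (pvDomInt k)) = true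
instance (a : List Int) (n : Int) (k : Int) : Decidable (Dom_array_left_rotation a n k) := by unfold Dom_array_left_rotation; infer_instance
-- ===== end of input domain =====

-- B replaces A's scatter loop into a preallocated buffer by gathering the two runs a[k..n-1] then a[0..k-1] directly (simpler; same O(n) cost).


-- ===== PORT A =====
-- vec = [None]*n: placeholder 0 — under Pre_ the loop overwrites every slot, so no placeholder survives.
-- pyGetD / pySetD are exact here: under Pre_ every index i and (n+i-k)%n is in range.
def array_left_rotation (a : List Int) (n : Int) (k : Int) : List Int :=
  let vec := List.replicate n.toNat (0 : Int)
  let k2 := PySem.Int.mod k n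
  (PySem.List.pyRange 0 n 1).foldl (fun vec i =>
    let newPosition := PySem.Int.mod (n + i - k2) n
    PySem.List.pySetD vec newPosition (PySem.List.pyGetD a i 0)) vec

-- ===== PORT B =====
-- B: k %= n, then [a[i] for i in range(k, n)] + [a[i] for i in range(k)].
-- pyGetD is exact here: under Pre_ every gathered index is in range.
def array_left_rotation_alt (a : List Int) (n : Int) (k : Int) : List Int :=
  let k2 := PySem.Int.mod k n
  (PySem.List.pyRange k2 n 1).map (fun i => PySem.List.pyGetD a i 0)
    ++ (PySem.List.pyRange 0 k2 1).map (fun i => PySem.List.pyGetD a i 0)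

-- ===== PRECONDITION & SPEC =====
-- Pre_ excludes exactly the inputs where A raises: n = 0 (k % n raises ZeroDivisionError)
-- and n > len(a) (A raises IndexError reading a[i] past the end). B raises there too.
def Pre_array_left_rotation (a : List Int) (n : Int) (k : Int) : Prop :=
  n ≠ 0 ∧ n ≤ (a.length : Int)
instance (a : List Int) (n : Int) (k : Int) : Decidable (Pre_array_left_rotation a n k) := by
  unfold Pre_array_left_rotation; infer_instance
def pvWitness_array_left_rotation : List Int × Int × Int := ([1, 2, 3, 4], 4, 1)

def Spec_array_left_rotation (a : List Int) (n : Int) (k : Int) (out : List Int) : Prop := out = array_left_rotation_alt a n k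
instance (a : List Int) (n : Int) (k : Int) (out : List Int) : Decidable (Spec_array_left_rotation a n k out) := by unfold Spec_array_left_rotation; infer_instance

-- ===== CLAIM =====
def Claim_equal_array_left_rotation : Prop := ∀ (a : List Int) (n : Int) (k : Int), Dom_array_left_rotation a n k → Pre_array_left_rotation a n k → Spec_array_left_rotation a n k (array_left_rotation a n k)

-- ===== LEMMAS AND PROOFS =====

-- (N+i-K) % N and (j+K) % N are inverse permutations of {0,…,N-1}.
theorem pos_inv {N K i j : ℕ} (hK : K < N) (hi : i < N) (hj : j < N) :
    j = (N + i - K) % N ↔ (j + K) % N = i := by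
  constructor
  · rintro rfl
    calc ((N + i - K) % N + K) % N = (N + i - K + K) % N := Nat.mod_add_mod ..
      _ = (N + i) % N := by rw [Nat.sub_add_cancel (by omega)]
      _ = i % N := by rw [Nat.add_comm, Nat.add_mod_right]
      _ = i := Nat.mod_eq_of_lt hi
  · rintro rfl
    have hs : (j + K) % N < N := Nat.mod_lt _ (by omega)
    have : N + (j + K) % N - K = (j + K) % N + (N - K) := by omega
    rw [this]; symm
    calc ((j + K) % N + (N - K)) % N = (j + K + (N - K)) % N := Nat.mod_add_mod ..
      _ = (j + N) % N := by rw [Nat.add_assoc, Nat.add_sub_cancel' (by omega : K ≤ N)]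
      _ = j % N := Nat.add_mod_right ..
      _ = j := Nat.mod_eq_of_lt hj

-- the Nat-side scatter loop of A
def scatter (a : List Int) (N K m : ℕ) : List Int :=
  (List.range m).foldl (fun v j => v.set ((N + j - K) % N) (a.getD j 0)) (List.replicate N (0 : Int))

theorem scatter_length (a : List Int) (N K m : ℕ) : (scatter a N K m).length = N := by
  unfold scatter
  induction m with
  | zero => simp
  | succ m ih => rw [List.range_succ, List.foldl_append, List.foldl_cons, List.foldl_nil,
      List.length_set, ih]

theorem scatter_succ (a : List Int) (N K m : ℕ) :
    scatter a N K (m + 1) = (scatter a N K m).set ((N + m - K) % N) (a.getD m 0) := by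
  unfold scatter
  rw [List.range_succ, List.foldl_append, List.foldl_cons, List.foldl_nil]

theorem scatter_getElem? (a : List Int) (N K : ℕ) (hK : K < N) (m : ℕ) (hm : m ≤ N) (j : ℕ) :
    (scatter a N K m)[j]? =
      if j < N then (if (j + K) % N < m then some (a.getD ((j + K) % N) 0) else some 0)
      else none := by
  induction m with
  | zero =>
    simp [scatter, List.getElem?_replicate]
  | succ m ih =>
    have ih := ih (by omega)
    rw [scatter_succ, List.getElem?_set, scatter_length a N K m]
    have hmodN : (N + m - K) % N < N := Nat.mod_lt _ (by omega)
    by_cases hje : (N + m - K) % N = j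
    · have hjN : j < N := hje ▸ hmodN
      have hmj : (j + K) % N = m := (pos_inv hK (by omega) hjN).1 hje.symm
      rw [if_pos hje, if_pos hmodN, if_pos hjN, if_pos (by omega : (j + K) % N < m + 1), hmj]
    · rw [if_neg hje, ih]
      by_cases hjN : j < N
      · have hne : (j + K) % N ≠ m := fun h => hje (((pos_inv hK (by omega) hjN).2 h).symm)
        rw [if_pos hjN, if_pos hjN,
          if_congr (by omega : ((j + K) % N < m) ↔ ((j + K) % N < m + 1)) rfl rfl]
      · rw [if_neg hjN, if_neg hjN]

-- ===== VERDICT =====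
theorem array_left_rotation_spec : Claim_equal_array_left_rotation := by
  intro a n k _ hpre
  obtain ⟨hn0, hlen⟩ := hpre
  unfold Spec_array_left_rotation
  simp only [array_left_rotation, array_left_rotation_alt]
  by_cases hn : 0 < n
  case neg =>
    -- n < 0: both sides are []
    have hnneg : n < 0 := by omega
    obtain ⟨hb1, hb2⟩ := PySem.Int.mod_neg_bounds (a := k) hnneg
    rw [PySem.List.pyRange_one_eq_nil (by omega), PySem.List.pyRange_one_eq_nil hb2,
      PySem.List.pyRange_one_eq_nil (le_of_lt hb1)]
    simp [Int.toNat_of_nonpos (by omega : n ≤ 0)]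
  case pos =>
  set K : Int := PySem.Int.mod k n with hKdef
  have hK0 : 0 ≤ K := PySem.Int.mod_nonneg k hn
  have hKn : K < n := PySem.Int.mod_lt k hn
  set N : ℕ := n.toNat with hNdef
  set Kn : ℕ := K.toNat with hKndef
  have hnN : n = (N : Int) := by omega
  have hKKn : K = (Kn : Int) := by omega
  have hKnN : Kn < N := by omega
  have hNlen : N ≤ a.length := by omega
  -- A side: reduce to the Nat scatter loop
  have hA : (PySem.List.pyRange 0 n 1).foldl (fun vec i =>
        PySem.List.pySetD vec (PySem.Int.mod (n + i - K) n) (PySem.List.pyGetD a i 0))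
        (List.replicate n.toNat (0 : Int)) = scatter a N Kn N := by
    rw [PySem.List.pyRange_one, List.foldl_map]
    have : (n - 0).toNat = N := by omega
    rw [this]
    unfold scatter
    apply PySem.List.foldl_congr_mem
    intro acc j hj
    have hjN : j < N := List.mem_range.mp hj
    have h1 : n + (0 + (j : Int)) - K = ((N + j - Kn : ℕ) : Int) := by
      omega
    rw [h1, PySem.Int.mod_eq_emod_of_pos hn, hnN]
    have h2 : ((N + j - Kn : ℕ) : Int) % ((N : ℕ) : Int) = (((N + j - Kn) % N : ℕ) : Int) := by
      push_cast; ring_nf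
    rw [h2, PySem.List.pySetD_natCast]
    norm_num
  rw [hA]
  -- B side: the two gathered runs
  have hB1 : (PySem.List.pyRange K n 1).map (fun i => PySem.List.pyGetD a i 0)
      = (List.range (N - Kn)).map (fun j => a.getD (Kn + j) 0) := by
    rw [PySem.List.pyRange_one, List.map_map]
    have : (n - K).toNat = N - Kn := by omega
    rw [this]
    apply List.map_congr_left
    intro j _
    simp only [Function.comp]
    rw [hKKn]
    have : ((Kn : Int)) + (j : Int) = ((Kn + j : ℕ) : Int) := by push_cast; ring
    rw [this, PySem.List.pyGetD_natCast]
  have hB2 : (PySem.List.pyRange 0 K 1).map (fun i => PySem.List.pyGetD a i 0)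
      = (List.range Kn).map (fun j => a.getD j 0) := by
    rw [PySem.List.pyRange_one, List.map_map]
    have : (K - 0).toNat = Kn := by omega
    rw [this]
    apply List.map_congr_left
    intro j _
    simp only [Function.comp]
    have : (0 : Int) + (j : Int) = ((j : ℕ) : Int) := by ring
    rw [this, PySem.List.pyGetD_natCast]
  rw [hB1, hB2]
  -- both equal (range N).map (fun j => a.getD ((j+Kn)%N) 0)
  have htgt : scatter a N Kn N = (List.range N).map (fun j => a.getD ((j + Kn) % N) 0) := by
    apply List.ext_getElem?
    intro j
    rw [scatter_getElem? a N Kn hKnN N le_rfl j]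
    by_cases hj : j < N
    · have hmod : (j + Kn) % N < N := Nat.mod_lt _ (by omega)
      rw [if_pos hj, if_pos hmod, List.getElem?_map, List.getElem?_range hj]
      rfl
    · rw [if_neg hj, List.getElem?_map, List.getElem?_eq_none (by simpa using Nat.le_of_not_lt hj)]
      rfl
  rw [htgt]
  have hsplit : N = (N - Kn) + Kn := by omega
  have hra : List.range N = List.range (N - Kn) ++ (List.range Kn).map (fun x => (N - Kn) + x) := by
    conv_lhs => rw [hsplit]
    rw [List.range_add]
  rw [hra, List.map_append]
  congr 1
  · apply List.map_congr_left
    intro j hj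
    have hjlt : j < N - Kn := List.mem_range.mp hj
    have : (j + Kn) % N = Kn + j := by
      rw [Nat.mod_eq_of_lt (by omega)]; omega
    rw [this]
  · rw [List.map_map]
    apply List.map_congr_left
    intro j hj
    have hjlt : j < Kn := List.mem_range.mp hj
    simp only [Function.comp]
    have : (N - Kn + j + Kn) % N = j := by
      have h1 : N - Kn + j + Kn = j + N := by omega
      rw [h1, Nat.add_mod_right, Nat.mod_eq_of_lt (by omega)]
    rw [this]
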